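-- pv_equiv track=rewrite | github.com/Sforeelking/ayed-2019-1 | laboratorios/Proyecto Pacman/Codigo/union.py | OrganizaMat
-- ===== SOURCE A (Python) =====
-- def OrganizaMat(Lab,x,y):
--     a = 0
--     b = x*4+2
--     cont = 0
--     matriz = []
--     for i in range (x*2+2):
--         linea = Lab[a:b]
--         linea = linea.strip()
--         linea2 = linea.split(' ')
--         matriz.append(linea2)
--         cont+=1
--         if cont >= 2:
--             cont = 0
--             a+= 2
--             b+= 2
--         a+= x*4+2
--         b+= x*4+2
--
--     return (matriz)
-- ===== SOURCE B (Python) =====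
-- def OrganizaMat(Lab, x, y):
--     # Peel the string pair-by-pair: each chunk of 2*base+2 chars yields two rows
--     # (its first and second base-sized pieces); then drop the chunk and continue
--     # with the remaining suffix.  x+1 pairs in total; no row indices needed.
--     base = x*4 + 2
--     step = 2*base + 2
--     matriz = []
--     append = matriz.append
--     rest = Lab
--     for _ in range(x + 1):
--         append(rest[:base].strip().split(' '))
--         append(rest[base:2*base].strip().split(' '))
--         rest = rest[step:]
--     return matriz
-- ===== Notes on version B (the rewrite author's own statement) =====
-- stated objective: alternative
-- what changed: Instead of stepping two running slice pointers with a cont toggle row by row, B peels the string pair-by-pair: each step cuts one chunk of 2*base+2 characters off the front of the remaining string, emits its two base-sized rows, and continues on the suffix, so no character indices into Lab are kept at all.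
import Mathlib
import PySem

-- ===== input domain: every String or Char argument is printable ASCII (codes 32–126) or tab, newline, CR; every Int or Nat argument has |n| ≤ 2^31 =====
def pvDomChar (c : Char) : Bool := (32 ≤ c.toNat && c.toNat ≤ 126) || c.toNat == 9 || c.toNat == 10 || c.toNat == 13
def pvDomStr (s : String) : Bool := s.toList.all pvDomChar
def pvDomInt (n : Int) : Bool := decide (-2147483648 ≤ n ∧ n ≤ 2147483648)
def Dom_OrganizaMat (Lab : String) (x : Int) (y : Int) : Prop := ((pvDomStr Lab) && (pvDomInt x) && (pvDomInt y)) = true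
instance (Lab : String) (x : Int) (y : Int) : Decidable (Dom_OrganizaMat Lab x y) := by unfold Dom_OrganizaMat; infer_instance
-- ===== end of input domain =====

set_option maxHeartbeats 1000000


-- B replaces A's row-by-row loop with running slice pointers and a cont toggle by a
-- pair-by-pair peel of the string (two rows per chunk of 2*base+2 chars cut off the
-- front); objective: alternative decomposition, same cost.

-- ===== PORT A =====
-- state (a, b, cont, matriz); body transliterated branch for branch
def OrganizaMat (Lab : String) (x : Int) (y : Int) : List (List String) :=
  let fin := (PySem.List.pyRange 0 (x*2+2) 1).foldl
    (fun (st : Int × Int × Int × List (List String)) _ =>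
      let a := st.1
      let b := st.2.1
      let cont := st.2.2.1
      let matriz := st.2.2.2
      let linea := PySem.Str.slice Lab (some a) (some b)
      let linea := PySem.Str.strip linea
      let linea2 := (PySem.Str.split? linea " ").getD []   -- sep " " ≠ "", so never none
      let matriz := matriz ++ [linea2]
      let cont := cont + 1
      let (cont, a, b) := if cont ≥ 2 then ((0:Int), a + 2, b + 2) else (cont, a, b)
      (a + (x*4+2), b + (x*4+2), cont, matriz))
    (0, x*4+2, 0, [])
  fin.2.2.2

-- ===== PORT B =====
-- Source B: state (matriz, rest); each pass appends the front chunk's two rows and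
-- drops the chunk (step = 2*base+2 chars) off the front of rest
def OrganizaMat_alt (Lab : String) (x : Int) (y : Int) : List (List String) :=
  let base := x*4+2
  let step := 2*base+2
  let fin := (PySem.List.pyRange 0 (x+1) 1).foldl
    (fun (st : List (List String) × String) _ =>
      let matriz := st.1
      let rest := st.2
      let matriz := matriz ++ [(PySem.Str.split? (PySem.Str.strip (PySem.Str.slice rest none (some base))) " ").getD []]
      let matriz := matriz ++ [(PySem.Str.split? (PySem.Str.strip (PySem.Str.slice rest (some base) (some (2*base)))) " ").getD []]
      (matriz, PySem.Str.slice rest (some step) none))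
    ([], Lab)
  fin.1

-- ===== PRECONDITION & SPEC =====
def Spec_OrganizaMat (Lab : String) (x : Int) (y : Int) (out : List (List String)) : Prop := out = OrganizaMat_alt Lab x y
instance (Lab : String) (x : Int) (y : Int) (out : List (List String)) : Decidable (Spec_OrganizaMat Lab x y out) := by unfold Spec_OrganizaMat; infer_instance

-- ===== CLAIM (what is proved, stated in full; the proofs are below) =====
def Claim_equal_OrganizaMat : Prop := ∀ (Lab : String) (x : Int) (y : Int), Dom_OrganizaMat Lab x y → Spec_OrganizaMat Lab x y (OrganizaMat Lab x y)

-- ===== LEMMAS AND PROOFS =====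

-- recursive form of B's loop, used only by the proofs
def pvPeel (base : Int) (rest : String) (pairs : Int) : List (List String) :=
  if pairs ≤ 0 then []
  else
    [ (PySem.Str.split? (PySem.Str.strip (PySem.Str.slice rest none (some base))) " ").getD [],
      (PySem.Str.split? (PySem.Str.strip (PySem.Str.slice rest (some base) (some (2*base)))) " ").getD [] ]
    ++ pvPeel base (PySem.Str.slice rest (some (2*base+2)) none) (pairs - 1)
termination_by pairs.toNat
decreasing_by omega

theorem pvPeel_unfold (base : Int) (rest : String) (pairs : Int) :
    pvPeel base rest pairs =
      if pairs ≤ 0 then []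
      else
        [ (PySem.Str.split? (PySem.Str.strip (PySem.Str.slice rest none (some base))) " ").getD [],
          (PySem.Str.split? (PySem.Str.strip (PySem.Str.slice rest (some base) (some (2*base)))) " ").getD [] ]
        ++ pvPeel base (PySem.Str.slice rest (some (2*base+2)) none) (pairs - 1) := by
  rw [pvPeel]

-- the loop body of port B, named for the proofs
def pvStepB (base step : Int) (st : List (List String) × String) (_i : Int) :
    List (List String) × String :=
  let matriz := st.1
  let rest := st.2
  let matriz := matriz ++ [(PySem.Str.split? (PySem.Str.strip (PySem.Str.slice rest none (some base))) " ").getD []]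
  let matriz := matriz ++ [(PySem.Str.split? (PySem.Str.strip (PySem.Str.slice rest (some base) (some (2*base)))) " ").getD []]
  (matriz, PySem.Str.slice rest (some step) none)

theorem pvOrganizaMat_alt_eq (Lab : String) (x y : Int) :
    OrganizaMat_alt Lab x y =
      ((PySem.List.pyRange 0 (x+1) 1).foldl (pvStepB (x*4+2) (2*(x*4+2)+2)) ([], Lab)).1 := rfl

-- B's loop is the pair-peeling recursion with an accumulator in front
theorem pvLoop_eq_peel (x : Int) :
    ∀ (l : List Int) (acc : List (List String)) (rest : String) (pairs : Int),
      pairs.toNat = l.length →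
      (l.foldl (pvStepB (x*4+2) (2*(x*4+2)+2)) (acc, rest)).1 = acc ++ pvPeel (x*4+2) rest pairs := by
  intro l
  induction l with
  | nil =>
    intro acc rest pairs h
    rw [List.foldl_nil, pvPeel_unfold, if_pos (by simp at h; omega)]
    simp
  | cons a l ih =>
    intro acc rest pairs h
    rw [List.foldl_cons]
    have h' : (pairs - 1).toNat = l.length := by simp at h; omega
    rw [show pvStepB (x*4+2) (2*(x*4+2)+2) (acc, rest) a =
          (acc ++ [(PySem.Str.split? (PySem.Str.strip (PySem.Str.slice rest none (some (x*4+2)))) " ").getD []]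
               ++ [(PySem.Str.split? (PySem.Str.strip (PySem.Str.slice rest (some (x*4+2)) (some (2*(x*4+2))))) " ").getD []],
           PySem.Str.slice rest (some (2*(x*4+2)+2)) none) from rfl]
    rw [ih _ _ (pairs - 1) h']
    conv_rhs => rw [pvPeel_unfold]
    rw [if_neg (show ¬ pairs ≤ 0 by simp at h; omega)]
    simp

-- the loop body of port A, named for the proofs
def pvStepA (Lab : String) (x : Int) (st : Int × Int × Int × List (List String)) (_i : Int) :
    Int × Int × Int × List (List String) :=
  let a := st.1
  let b := st.2.1
  let cont := st.2.2.1
  let matriz := st.2.2.2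
  let linea := PySem.Str.slice Lab (some a) (some b)
  let linea := PySem.Str.strip linea
  let linea2 := (PySem.Str.split? linea " ").getD []
  let matriz := matriz ++ [linea2]
  let cont := cont + 1
  let (cont, a, b) := if cont ≥ 2 then ((0:Int), a + 2, b + 2) else (cont, a, b)
  (a + (x*4+2), b + (x*4+2), cont, matriz)

-- the two rows contributed by pair p, read off the character list
def pvRowL (cs : List Char) : List String :=
  (PySem.Str.split? (PySem.Str.strip (String.ofList cs)) " ").getD []

def pvPair (Lab : String) (bN : Nat) (p : Nat) : List (List String) :=
  [ pvRowL ((Lab.toList.drop (p*(2*bN+2))).take bN),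
    pvRowL ((Lab.toList.drop (p*(2*bN+2)+bN)).take bN) ]

theorem pvOrganizaMat_eq_step (Lab : String) (x y : Int) :
    OrganizaMat Lab x y =
      ((PySem.List.pyRange 0 (x*2+2) 1).foldl (pvStepA Lab x) (0, x*4+2, 0, [])).2.2.2 := rfl

theorem pvIdx (x : Int) (hx : 0 ≤ x) (m : Nat) :
    ((m:Int)*(x*8+6)).toNat = m*(2*(x*4+2).toNat+2) := by
  have h2 : ((x*4+2).toNat : Int) = x*4+2 := by omega
  have h1 : (((m*(2*(x*4+2).toNat+2)) : Nat) : Int) = (m:Int)*(x*8+6) := by push_cast [h2]; ring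
  have hpos : (0:Int) ≤ (m:Int)*(x*8+6) := by positivity
  omega

-- A's loop invariant, rows grouped pairwise: after 2*m iterations the state is in
-- closed form and the accumulated rows are the first m pairs
theorem pvInvariant (Lab : String) (x : Int) (hx : 0 ≤ x) (m : Nat) :
    (PySem.List.pyRange 0 ((2*m : Nat) : Int) 1).foldl (pvStepA Lab x) (0, x*4+2, 0, []) =
      ((m:Int)*(x*8+6),
       (m:Int)*(x*8+6) + (x*4+2),
       0,
       (List.range m).flatMap (pvPair Lab (x*4+2).toNat)) := by
  have h2' : ((x*4+2).toNat : Int) = x*4+2 := by omega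
  induction m with
  | zero => simp [PySem.List.pyRange]
  | succ m ih =>
    have h2 : ((2*(m+1) : Nat) : Int) = ((2*m : Nat) : Int) + 2 := by push_cast; ring
    have hsplit : PySem.List.pyRange 0 ((2*(m+1) : Nat) : Int) 1 =
        PySem.List.pyRange 0 ((2*m : Nat) : Int) 1 ++ [((2*m : Nat) : Int), ((2*m : Nat) : Int) + 1] := by
      rw [PySem.List.pyRange_one_append 0 ((2*m : Nat) : Int) ((2*(m+1) : Nat) : Int)
            (by positivity) (by push_cast; omega)]
      congr 1
      rw [PySem.List.pyRange_one_cons (by push_cast; omega)]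
      congr 1
      rw [PySem.List.pyRange_one_cons (by push_cast; omega)]
      rw [h2]
      simp [PySem.List.pyRange]
      omega
    rw [hsplit, List.foldl_append, ih]
    simp only [List.foldl_cons, List.foldl_nil]
    unfold pvStepA
    norm_num
    have hposm : (0:Int) ≤ (m:Int)*(x*8+6) := by positivity
    have hIdx := pvIdx x hx m
    have hs1 : PySem.Str.slice Lab (some ((m:Int)*(x*8+6))) (some ((m:Int)*(x*8+6) + (x*4+2))) =
        String.ofList ((Lab.toList.drop (m*(2*(x*4+2).toNat+2))).take (x*4+2).toNat) := by
      apply String.toList_injective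
      rw [PySem.Str.toList_slice]
      simp only [PySem.Chars.slice_eq_listSlice]
      rw [PySem.List.slice_toNat _ (by positivity) (by omega)]
      rw [String.toList_ofList]
      congr 2 <;> omega
    have hs2 : PySem.Str.slice Lab (some ((m:Int)*(x*8+6) + (x*4+2))) (some ((m:Int)*(x*8+6) + (x*4+2) + (x*4+2))) =
        String.ofList ((Lab.toList.drop (m*(2*(x*4+2).toNat+2)+(x*4+2).toNat)).take (x*4+2).toNat) := by
      apply String.toList_injective
      rw [PySem.Str.toList_slice]
      simp only [PySem.Chars.slice_eq_listSlice]
      rw [PySem.List.slice_toNat _ (by omega) (by omega)]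
      rw [String.toList_ofList]
      congr 2 <;> omega
    refine ⟨by ring, by ring, ?_⟩
    rw [List.range_succ, List.flatMap_append]
    simp only [List.flatMap_cons, List.flatMap_nil, List.append_nil]
    refine congrArg₂ (· ++ ·) rfl ?_
    rw [hs1, hs2]
    simp only [pvPair, pvRowL]

-- B's peel produces exactly the pairs of its argument string, pair by pair
theorem pvPeel_eq_pairs (x : Int) (hx : 0 ≤ x) (n : Nat) :
    ∀ (rest : String) (pairs : Int), pairs.toNat = n →
      pvPeel (x*4+2) rest pairs = (List.range n).flatMap (pvPair rest (x*4+2).toNat) := by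
  induction n with
  | zero =>
    intro rest pairs h
    rw [pvPeel_unfold, if_pos (by omega)]
    simp
  | succ n ih =>
    intro rest pairs h
    rw [pvPeel_unfold, if_neg (by omega)]
    rw [ih (PySem.Str.slice rest (some (2*(x*4+2)+2)) none) (pairs - 1) (by omega)]
    have hdrop : (PySem.Str.slice rest (some (2*(x*4+2)+2)) none).toList =
        rest.toList.drop (2*(x*4+2).toNat+2) := by
      rw [PySem.Str.toList_slice]
      simp only [PySem.Chars.slice_eq_listSlice]
      rw [PySem.List.slice_from _ (by omega)]
      congr 1
      omega
    have hshift : ∀ p : Nat, pvPair (PySem.Str.slice rest (some (2*(x*4+2)+2)) none) ((x*4+2).toNat) p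
        = pvPair rest ((x*4+2).toNat) (p+1) := by
      intro p
      simp only [pvPair, hdrop, List.drop_drop]
      have e1 : 2*(x*4+2).toNat+2 + p*(2*(x*4+2).toNat+2) = (p+1)*(2*(x*4+2).toNat+2) := by ring
      have e2 : 2*(x*4+2).toNat+2 + (p*(2*(x*4+2).toNat+2)+(x*4+2).toNat)
          = (p+1)*(2*(x*4+2).toNat+2)+(x*4+2).toNat := by ring
      rw [e1, e2]
    have hh1 : PySem.Str.slice rest none (some (x*4+2)) = String.ofList (rest.toList.take (x*4+2).toNat) := by
      apply String.toList_injective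
      rw [PySem.Str.toList_slice]
      simp only [PySem.Chars.slice_eq_listSlice]
      rw [PySem.List.slice_to _ (by omega)]
      rw [String.toList_ofList]
    have hh2 : PySem.Str.slice rest (some (x*4+2)) (some (2*(x*4+2)))
        = String.ofList ((rest.toList.drop (x*4+2).toNat).take (x*4+2).toNat) := by
      apply String.toList_injective
      rw [PySem.Str.toList_slice]
      simp only [PySem.Chars.slice_eq_listSlice]
      rw [PySem.List.slice_toNat _ (by omega) (by omega)]
      rw [String.toList_ofList]
      congr 2 <;> omega
    have hrange : List.range (n+1) = 0 :: (List.range n).map Nat.succ :=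
      List.range_succ_eq_map
    rw [hrange]
    simp only [List.flatMap_cons, List.flatMap_map, Nat.succ_eq_add_one]
    refine congrArg₂ (· ++ ·) ?_ ?_
    · -- the head chunk's two rows equal pair 0 of rest
      rw [hh1, hh2]
      simp only [pvPair, pvRowL, Nat.zero_mul, Nat.zero_add, List.drop_zero]
    · exact List.flatMap_congr (fun p _ => hshift p)

-- ===== VERDICT (by name: the statement is the Claim_ definition above) =====
theorem OrganizaMat_spec : Claim_equal_OrganizaMat := by
  intro Lab x y _
  unfold Spec_OrganizaMat
  rw [pvOrganizaMat_alt_eq,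
      pvLoop_eq_peel x (PySem.List.pyRange 0 (x+1) 1) [] Lab (x+1)
        (by rw [PySem.List.length_pyRange_one]; omega),
      List.nil_append]
  by_cases hx : 0 ≤ x
  · have hcount : x*2+2 = ((2*(x+1).toNat : Nat) : Int) := by omega
    rw [pvOrganizaMat_eq_step, hcount, pvInvariant Lab x hx,
        pvPeel_eq_pairs x hx (x+1).toNat Lab (x+1) rfl]
  · have hA : PySem.List.pyRange 0 (x*2+2) 1 = [] := by
      simp [PySem.List.pyRange]; omega
    rw [pvOrganizaMat_eq_step, hA, pvPeel_unfold, if_pos (by omega)]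
    rfl
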